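-- pv_equiv track=rewrite | github.com/PhungLai728/OnML | src/main_cc.py | rem_sublist
-- ===== SOURCE A (Python) =====
-- from copy import deepcopy
--
-- def sublist(list_, sub_list):
--     if(all(x in list_ for x in sub_list)):
--         return True
--     else:
--         return False
--
-- def rem_sublist(tuples_list):
--     # Remove sub-tuples
--     tuples_list_merge = deepcopy(tuples_list)
--     for i in range(len(tuples_list)):
--         for j in range(len(tuples_list)):
--             if i != j:
--                 if sublist(tuples_list[i], tuples_list[j]) == True: # i is list, j is sublist
--                     if tuples_list[j] in tuples_list_merge:
--                         tuples_list_merge.remove(tuples_list[j])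
--                 if sublist(tuples_list[j], tuples_list[i]) == True:# j is list, i is sublist
--                     if tuples_list[i] in tuples_list_merge:
--                         tuples_list_merge.remove(tuples_list[i])
--     tuples_list = deepcopy(tuples_list_merge)
--     return tuples_list
-- ===== SOURCE B (Python) =====
-- def rem_sublist(tuples_list):
--     # Inverted index: element -> set of positions whose tuple contains it.
--     postings = {}
--     for p, t in enumerate(tuples_list):
--         for x in t:
--             postings.setdefault(x, set()).add(p)
--     n = len(tuples_list)
--     out = []
--     for p, t in enumerate(tuples_list):
--         if t:
--             holders = set.intersection(*(postings[x] for x in set(t)))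
--             if holders == {p}:
--                 out.append(t)
--         else:
--             # empty tuple is a subset of every other tuple
--             if n == 1:
--                 out.append(t)
--     return out
-- ===== Notes on version B (the rewrite author's own statement) =====
-- stated objective: alternative
-- what changed: Replaced A's quadratic pairwise scan with repeated list.remove calls by an inverted index (element -> set of positions) plus one pass that keeps a tuple iff the intersection of its elements' posting sets is exactly its own position.
import Mathlib
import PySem

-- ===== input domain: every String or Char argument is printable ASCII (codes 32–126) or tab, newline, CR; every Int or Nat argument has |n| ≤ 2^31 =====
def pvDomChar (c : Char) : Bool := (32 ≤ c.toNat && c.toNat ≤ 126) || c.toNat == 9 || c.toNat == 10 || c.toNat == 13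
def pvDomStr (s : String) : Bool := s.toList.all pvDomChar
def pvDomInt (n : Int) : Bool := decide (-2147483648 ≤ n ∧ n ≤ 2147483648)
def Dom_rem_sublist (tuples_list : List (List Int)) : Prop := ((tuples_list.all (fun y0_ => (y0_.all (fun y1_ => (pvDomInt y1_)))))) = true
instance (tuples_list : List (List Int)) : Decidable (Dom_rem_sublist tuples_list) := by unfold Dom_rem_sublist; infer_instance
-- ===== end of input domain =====

-- B replaces A's O(n^2) pairwise remove-scan with an inverted index (element -> set of
-- positions) and keeps a tuple iff the intersection of its elements' posting sets is
-- exactly its own position; same return value, A is not mutated by either version.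

-- ===== PORT A =====
-- Python helper `sublist(list_, sub_list)`
def sublistA (list_ sub_list : List Int) : Bool :=
  if sub_list.all (fun x => list_.contains x) then true else false

-- Python `if v in merge: merge.remove(v)` (list.remove = delete first occurrence)
def removeIfIn (m : List (List Int)) (v : List Int) : List (List Int) :=
  if m.contains v then (PySem.List.remove? m v).getD m else m

def rem_sublist (tuples_list : List (List Int)) : List (List Int) :=
  (PySem.List.pyRange 0 tuples_list.length 1).foldl (fun merge i =>
    (PySem.List.pyRange 0 tuples_list.length 1).foldl (fun merge j =>
      if i ≠ j then
        let ti := PySem.List.pyGetD tuples_list i []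
        let tj := PySem.List.pyGetD tuples_list j []
        let merge1 := if sublistA ti tj = true then removeIfIn merge tj else merge
        if sublistA tj ti = true then removeIfIn merge1 ti else merge1
      else merge) merge) tuples_list

-- ===== PORT B =====
def rem_sublist_alt (tuples_list : List (List Int)) : List (List Int) :=
  -- postings: element -> set of positions whose tuple contains it (setdefault+add)
  let postings : PySem.Dict Int (PySem.Set Int) :=
    (PySem.List.enumerate tuples_list 0).foldl (fun d pt =>
      pt.2.foldl (fun d x => d.modify x PySem.Set.empty (fun s => PySem.Set.add s pt.1)) d)
      PySem.Dict.empty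
  let n := tuples_list.length
  (PySem.List.enumerate tuples_list 0).foldl (fun out pt =>
    if pt.2 ≠ [] then
      -- set.intersection(*(postings[x] for x in set(t))); keys are present since x ∈ t
      let holders : PySem.Set Int :=
        match PySem.Set.ofList pt.2 with
        | [] => PySem.Set.empty        -- unreachable: pt.2 ≠ []
        | x :: rest =>
          rest.foldl (fun acc y => PySem.Set.inter acc (postings.getD y PySem.Set.empty))
            (postings.getD x PySem.Set.empty)
      if PySem.Set.equal holders (PySem.Set.ofList [pt.1]) then out ++ [pt.2] else out
    else
      if n = 1 then out ++ [pt.2] else out) []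

-- ===== PRECONDITION & SPEC =====
def Spec_rem_sublist (tuples_list : List (List Int)) (out : List (List Int)) : Prop := out = rem_sublist_alt tuples_list
instance (tuples_list : List (List Int)) (out : List (List Int)) : Decidable (Spec_rem_sublist tuples_list out) := by unfold Spec_rem_sublist; infer_instance

-- ===== CLAIM (what is proved, stated in full; the proofs are below) =====
def Claim_equal_rem_sublist : Prop := ∀ (tuples_list : List (List Int)), Dom_rem_sublist tuples_list → Spec_rem_sublist tuples_list (rem_sublist tuples_list)

-- ===== LEMMAS AND PROOFS =====

-- `sub` is a subset (as membership) of `u`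
def subB (sub u : List Int) : Bool := sub.all (fun x => u.contains x)

-- value-level survival predicate: unique value, not member-subset of any other tuple
def keepB (l : List (List Int)) (t : List Int) : Bool :=
  (l.count t == 1) && l.all (fun u => (u == t) || !(subB t u))

-- Nat-indexed form of A's loop body
def natBody (l : List (List Int)) (i j : Nat) (m : List (List Int)) : List (List Int) :=
  if i ≠ j then
    let ti := l.getD i []
    let tj := l.getD j []
    let m1 := if sublistA ti tj = true then removeIfIn m tj else m
    if sublistA tj ti = true then removeIfIn m1 ti else m1
  else m

def natLoop (l : List (List Int)) : List (List Int) :=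
  (List.range l.length).foldl (fun m i => (List.range l.length).foldl (fun m j => natBody l i j m) m) l

-- the removal requests of A's double loop, in order
def pairReq (l : List (List Int)) (i j : Nat) : List (List Int) :=
  if i ≠ j then
    (if subB (l.getD j []) (l.getD i []) then [l.getD j []] else []) ++
    (if subB (l.getD i []) (l.getD j []) then [l.getD i []] else [])
  else []

def reqs (l : List (List Int)) : List (List Int) :=
  (List.range l.length).flatMap (fun i => (List.range l.length).flatMap (fun j => pairReq l i j))

def applyReqs (m : List (List Int)) (rs : List (List Int)) : List (List Int) :=
  rs.foldl removeIfIn m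

lemma rem_sublist_eq_natLoop (l : List (List Int)) : rem_sublist l = natLoop l := by
  unfold rem_sublist natLoop natBody
  simp [PySem.List.pyRange_one, List.foldl_map, PySem.List.pyGetD_natCast]

lemma foldl_flatMap' {α β γ : Type} (xs : List α) (f : α → List β) (g : γ → β → γ) (init : γ) :
    (xs.flatMap f).foldl g init = xs.foldl (fun a x => (f x).foldl g a) init := by
  induction xs generalizing init with
  | nil => rfl
  | cons x xs ih => simp [List.flatMap_cons, List.foldl_append, ih]

lemma sublistA_eq (a b : List Int) : sublistA a b = subB b a := by
  unfold sublistA subB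
  split <;> simp_all

lemma pairReq_foldl (l : List (List Int)) (i j : Nat) (m : List (List Int)) :
    (pairReq l i j).foldl removeIfIn m = natBody l i j m := by
  unfold pairReq natBody
  by_cases hij : i = j
  · simp [hij]
  · simp only [ne_eq, hij, not_false_eq_true, if_true, sublistA_eq,
      List.getD_eq_getElem?_getD]
    by_cases h1 : subB (l[j]?.getD []) (l[i]?.getD []) = true <;>
      by_cases h2 : subB (l[i]?.getD []) (l[j]?.getD []) = true <;>
        simp [h1, h2]

lemma natLoop_eq_applyReqs (l : List (List Int)) : natLoop l = applyReqs l (reqs l) := by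
  unfold natLoop applyReqs reqs
  rw [foldl_flatMap']
  congr 1
  funext m i
  rw [foldl_flatMap']
  congr 1
  funext m' j
  exact (pairReq_foldl l i j m').symm

lemma applyReqs_nil (rs : List (List Int)) : applyReqs [] rs = [] := by
  induction rs with
  | nil => rfl
  | cons r rs ih => simpa [applyReqs, removeIfIn] using ih

lemma removeIfIn_cons_of_ne (a : List Int) (l : List (List Int)) (r : List Int) (h : r ≠ a) :
    removeIfIn (a :: l) r = a :: removeIfIn l r := by
  by_cases hm : r ∈ l
  · have h1 : removeIfIn (a :: l) r = a :: l.erase r := by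
      simp [removeIfIn, hm,
        PySem.List.remove?_cons_of_ne l (Ne.symm h), PySem.List.remove?_eq_some_erase l r hm]
    have h2 : removeIfIn l r = l.erase r := by
      simp [removeIfIn, hm, PySem.List.remove?_eq_some_erase l r hm]
    rw [h1, h2]
  · have h1 : removeIfIn (a :: l) r = a :: l := by
      unfold removeIfIn
      have hc : (a :: l).contains r = false := by simp [hm, Ne.symm h, h]
      rw [hc]
      simp
    have h2 : removeIfIn l r = l := by simp [removeIfIn, hm]
    rw [h1, h2]
lemma applyReqs_cons (a : List Int) (l : List (List Int)) (rs : List (List Int)) :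
    applyReqs (a :: l) rs = if a ∈ rs then applyReqs l (rs.erase a) else a :: applyReqs l rs := by
  induction rs generalizing l with
  | nil => simp [applyReqs]
  | cons r rs ih =>
    show applyReqs (removeIfIn (a :: l) r) rs = _
    by_cases hra : r = a
    · subst hra
      have h1 : removeIfIn (r :: l) r = l := by
        simp [removeIfIn]
      rw [h1]
      simp [List.mem_cons_self, List.erase_cons_head]
    · rw [removeIfIn_cons_of_ne a l r hra, ih]
      have he : (r :: rs).erase a = r :: rs.erase a :=
        List.erase_cons_tail (by simpa using hra)
      by_cases has : a ∈ rs
      · have hm2 : a ∈ r :: rs := List.mem_cons_of_mem _ has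
        simp [has, hm2, he, applyReqs]
      · have hnot : a ∉ r :: rs := by simp [has, Ne.symm hra]
        simp [has, hnot, applyReqs]

lemma applyReqs_eq_filter (l rs : List (List Int))
    (h : ∀ v, v ∈ rs → v ∈ l → l.count v ≤ rs.count v) :
    applyReqs l rs = l.filter (fun v => !rs.contains v) := by
  induction l generalizing rs with
  | nil => simp [applyReqs_nil]
  | cons a l ih =>
    rw [applyReqs_cons]
    by_cases has : a ∈ rs
    · have hc : l.count a + 1 ≤ rs.count a := by
        have := h a has (List.mem_cons_self)
        simpa [List.count_cons_self] using this
      rw [if_pos has]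
      rw [ih (rs.erase a) ?hyp]
      case hyp =>
        intro v hv hvl
        by_cases hva : v = a
        · subst hva
          rw [List.count_erase_self]
          omega
        · rw [List.count_erase_of_ne hva]
          have := h v (List.mem_of_mem_erase hv) (List.mem_cons_of_mem _ hvl)
          simpa [List.count_cons, Ne.symm hva] using this
      rw [List.filter_cons]
      have hcond : (!rs.contains a) = false := by simp [has]
      rw [hcond]
      simp only [Bool.false_eq_true, if_false]
      apply List.filter_congr
      intro v hvl
      by_cases hva : v = a
      · subst hva
        have h2 : 2 ≤ rs.count v := by
          have : 1 ≤ l.count v := List.count_pos_iff.mpr hvl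
          omega
        have hmem1 : v ∈ rs.erase v := by
          have : 0 < (rs.erase v).count v := by rw [List.count_erase_self]; omega
          exact List.count_pos_iff.mp this
        simp [hmem1, has]
      · have hiff : v ∈ rs.erase a ↔ v ∈ rs := List.mem_erase_of_ne hva
        by_cases hvr : v ∈ rs <;> simp [hvr, hiff]
    · rw [if_neg has]
      rw [ih rs ?hyp2]
      case hyp2 =>
        intro v hv hvl
        have := h v hv (List.mem_cons_of_mem _ hvl)
        have hle : l.count v ≤ (a :: l).count v := by
          simp [List.count_cons]
        omega
      rw [List.filter_cons]
      simp [has]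

lemma count_flatMap' {α : Type} (xs : List α) (f : α → List (List Int)) (v : List Int) :
    ((xs.flatMap f).count v) = (xs.map (fun x => (f x).count v)).sum := by
  induction xs with
  | nil => rfl
  | cons x xs ih => simp [List.flatMap_cons, List.count_append, ih]

lemma map_getD_range {α : Type} (l : List α) (d : α) :
    (List.range l.length).map (fun i => l.getD i d) = l := by
  induction l with
  | nil => rfl
  | cons a l ih =>
    simp only [List.length_cons, List.range_succ_eq_map, List.map_cons, List.map_map]
    simpa using ih

lemma map_range_getD_ite (l : List (List Int)) (v : List Int) (c : Nat) :
    (List.range l.length).map (fun i => if l.getD i [] = v then c else 0)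
      = l.map (fun u => if u = v then c else 0) := by
  conv_rhs => rw [← map_getD_range l ([] : List Int)]
  rw [List.map_map]
  rfl

lemma sum_map_ite_count (l : List (List Int)) (v : List Int) (c : Nat) :
    (l.map (fun u => if u = v then c else 0)).sum = c * l.count v := by
  induction l with
  | nil => simp
  | cons a l ih =>
    by_cases h : a = v <;> simp [h, ih, List.count_cons, Nat.mul_add, Nat.add_comm]

lemma subB_self (t : List Int) : subB t t = true := by
  simp [subB, List.all_eq_true]

lemma filter_map'' {α β : Type} (f : α → β) (p : β → Bool) (xs : List α) :
    (xs.map f).filter p = (xs.filter (fun x => p (f x))).map f := by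
  induction xs with
  | nil => rfl
  | cons x xs ih => by_cases h : p (f x) <;> simp [List.filter_cons, h, ih]


lemma count_eq_length_filter_range (l : List (List Int)) (v : List Int) (d : List Int) :
    l.count v = ((List.range l.length).filter (fun q => l.getD q d = v)).length := by
  induction l with
  | nil => simp
  | cons a l ih =>
    simp only [List.length_cons, List.range_succ_eq_map, List.filter_cons, List.getD_cons_zero,
      filter_map'']
    by_cases h : a = v
    · simp [h, List.count_cons, ih, List.getD_cons_succ, Nat.add_comm]
    · simp [h, Ne.symm h, List.count_cons, ih, List.getD_cons_succ]


lemma mem_iff_exists_getD {α : Type} (l : List α) (u : α) (d : α) :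
    u ∈ l ↔ ∃ q, q < l.length ∧ l.getD q d = u := by
  constructor
  · intro hu
    obtain ⟨i, hi, hEq⟩ := List.mem_iff_getElem.mp hu
    refine ⟨i, hi, ?_⟩
    rw [List.getD_eq_getElem l d hi]
    exact hEq
  · rintro ⟨q, hq, rfl⟩
    rw [List.getD_eq_getElem l d hq]
    exact List.getElem_mem hq

-- the shared position/value equivalence

lemma two_le_length_of_two_mem {α : Type} {xs : List α} {a b : α} (hab : a ≠ b)
    (ha : a ∈ xs) (hb : b ∈ xs) : 2 ≤ xs.length := by
  cases xs with
  | nil => simp at ha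
  | cons x t =>
    cases t with
    | nil =>
      simp at ha hb
      exact absurd (ha.trans hb.symm) hab
    | cons y t2 => simp only [List.length_cons]; omega

lemma exists_two_of_two_le_length {α : Type} {xs : List α} (h2 : 2 ≤ xs.length)
    (hnd : xs.Nodup) : ∃ a b, a ≠ b ∧ a ∈ xs ∧ b ∈ xs := by
  cases xs with
  | nil => simp at h2
  | cons x t =>
    cases t with
    | nil => simp at h2
    | cons y t2 =>
      refine ⟨x, y, ?_, List.mem_cons_self, List.mem_cons_of_mem _ List.mem_cons_self⟩
      rcases List.nodup_cons.mp hnd with ⟨hx, _⟩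
      exact fun hEq => hx (hEq ▸ List.mem_cons_self)

lemma sum_ite_two (l : List (List Int)) (v : List Int) (i : Nat) (hi : i < l.length)
    (hiv : l.getD i [] = v) :
    ((List.range l.length).map (fun j => if j ≠ i ∧ l.getD j [] = v then 2 else 0)).sum
      = 2 * (l.count v - 1) := by
  have hmem : i ∈ List.range l.length := List.mem_range.mpr hi
  have hperm : (List.range l.length).Perm (i :: (List.range l.length).erase i) :=
    List.perm_cons_erase hmem
  have hF' : ((List.range l.length).map (fun j => if l.getD j [] = v then 2 else 0)).sum
      = 2 * l.count v := by
    have he : (List.range l.length).map (fun j => if l.getD j [] = v then 2 else 0)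
        = l.map (fun u => if u = v then 2 else 0) := by
      conv_rhs => rw [← map_getD_range l ([] : List Int)]
      rw [List.map_map]
      rfl
    rw [he, sum_map_ite_count]
  have hsplit' : (((i :: (List.range l.length).erase i)).map
      (fun j => if l.getD j [] = v then 2 else 0)).sum = 2 * l.count v := by
    rw [← (hperm.map _).sum_eq]
    exact hF'
  have herase' : (((List.range l.length).erase i).map
      (fun j => if l.getD j [] = v then 2 else 0)).sum = 2 * l.count v - 2 := by
    rw [List.map_cons, List.sum_cons, if_pos hiv] at hsplit'
    omega
  have hcg : (((List.range l.length).erase i).map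
      (fun j => if j ≠ i ∧ l.getD j [] = v then 2 else 0))
      = (((List.range l.length).erase i).map (fun j => if l.getD j [] = v then 2 else 0)) := by
    apply List.map_congr_left
    intro j hj
    have hji : j ≠ i := ((List.Nodup.mem_erase_iff List.nodup_range).mp hj).1
    simp [hji]
  have htarget : ((i :: (List.range l.length).erase i).map
      (fun j => if j ≠ i ∧ l.getD j [] = v then 2 else 0)).sum = 2 * l.count v - 2 := by
    rw [List.map_cons, List.sum_cons, hcg, herase']
    simp
  rw [(hperm.map _).sum_eq, htarget]
  have hc1 : 1 ≤ l.count v :=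
    List.count_pos_iff.mpr ((mem_iff_exists_getD l v []).mpr ⟨i, hi, hiv⟩)
  omega

lemma count_reqs_ge (l : List (List Int)) (v : List Int) (hv : v ∈ reqs l) (hl : v ∈ l) :
    l.count v ≤ (reqs l).count v := by
  by_cases hm2 : l.count v ≤ 1
  · have : 0 < (reqs l).count v := List.count_pos_iff.mpr hv
    omega
  · push_neg at hm2
    have e1 : (reqs l).count v = ((List.range l.length).map
        (fun i => ((List.range l.length).flatMap (fun j => pairReq l i j)).count v)).sum := by
      unfold reqs
      exact count_flatMap' _ _ _
    have e2 : ∀ i : Nat, (((List.range l.length).flatMap (fun j => pairReq l i j)).count v)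
        = ((List.range l.length).map (fun j => (pairReq l i j).count v)).sum :=
      fun i => count_flatMap' _ _ _
    have hb : ∀ i ∈ List.range l.length,
        (if l.getD i [] = v then 2 * (l.count v - 1) else 0)
          ≤ ((List.range l.length).map (fun j => (pairReq l i j).count v)).sum := by
      intro i hi
      by_cases hiv : l.getD i [] = v
      · rw [if_pos hiv]
        have hptw : ∀ j ∈ List.range l.length,
            (if j ≠ i ∧ l.getD j [] = v then 2 else 0) ≤ (pairReq l i j).count v := by
          intro j hj
          by_cases hc : j ≠ i ∧ l.getD j [] = v
          · rw [if_pos hc]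
            have hpr : pairReq l i j = [v, v] := by
              unfold pairReq
              have hj2 : l[j]?.getD ([] : List Int) = v := by
                rw [← List.getD_eq_getElem?_getD]; exact hc.2
              have hi2 : l[i]?.getD ([] : List Int) = v := by
                rw [← List.getD_eq_getElem?_getD]; exact hiv
              simp [hj2, hi2, subB_self, Ne.symm hc.1]
            rw [hpr]
            simp [List.count_cons]
          · rw [if_neg hc]
            exact Nat.zero_le _
        calc 2 * (l.count v - 1)
            = ((List.range l.length).map
                (fun j => if j ≠ i ∧ l.getD j [] = v then 2 else 0)).sum :=
              (sum_ite_two l v i (List.mem_range.mp hi) hiv).symm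
          _ ≤ _ := List.sum_le_sum hptw
      · rw [if_neg hiv]
        exact Nat.zero_le _
    have e3 : ((List.range l.length).map
        (fun i => if l.getD i [] = v then 2 * (l.count v - 1) else 0)).sum
        = (2 * (l.count v - 1)) * l.count v := by
      rw [map_range_getD_ite l v (2 * (l.count v - 1)), sum_map_ite_count]
    have hsum : (2 * (l.count v - 1)) * l.count v ≤ (reqs l).count v := by
      rw [e1]
      calc (2 * (l.count v - 1)) * l.count v
          = ((List.range l.length).map
              (fun i => if l.getD i [] = v then 2 * (l.count v - 1) else 0)).sum := e3.symm
        _ ≤ _ := by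
            apply List.sum_le_sum
            intro i hi
            rw [e2 i]
            exact hb i hi
    have hmul : l.count v ≤ (2 * (l.count v - 1)) * l.count v := by
      have h1 : 1 * l.count v ≤ (2 * (l.count v - 1)) * l.count v :=
        Nat.mul_le_mul_right (l.count v) (by omega)
      simpa using h1
    omega

-- positions ↔ count
lemma pos_iff_keep (l : List (List Int)) (k : Nat) (t : List Int)
    (hk : k < l.length) (ht : l.getD k [] = t) :
    ((∀ q, q < l.length → q ≠ k → subB t (l.getD q []) = false) ↔ keepB l t = true) := by
  have htl : t ∈ l := (mem_iff_exists_getD l t []).mpr ⟨k, hk, ht⟩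
  constructor
  · intro hpos
    have hqv : ∀ q, q < l.length → q ≠ k → l.getD q [] ≠ t := by
      intro q hq hqk hEq
      have hz := hpos q hq hqk
      rw [hEq, subB_self] at hz
      exact absurd hz (by simp)
    have hcnt : l.count t = 1 := by
      have hge : 1 ≤ l.count t := List.count_pos_iff.mpr htl
      have hle : l.count t ≤ 1 := by
        by_contra hgt
        push_neg at hgt
        rw [count_eq_length_filter_range l t []] at hgt
        have hnd : ((List.range l.length).filter (fun q => l.getD q [] = t)).Nodup :=
          (List.nodup_range).filter _
        obtain ⟨p1, p2, hne, hp1, hp2⟩ := exists_two_of_two_le_length (by omega) hnd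
        have m1 := List.mem_filter.mp hp1
        have m2 := List.mem_filter.mp hp2
        by_cases h1k : p1 = k
        · have h2k : p2 ≠ k := fun hh => hne (by rw [h1k, hh])
          exact hqv p2 (List.mem_range.mp m2.1) h2k (by simpa using m2.2)
        · exact hqv p1 (List.mem_range.mp m1.1) h1k (by simpa using m1.2)
      omega
    have hall : l.all (fun u => (u == t) || !(subB t u)) = true := by
      rw [List.all_eq_true]
      intro u hu
      obtain ⟨q, hq, hgu⟩ := (mem_iff_exists_getD l u []).mp hu
      by_cases hqk : q = k
      · have hut : u = t := by rw [← hgu, hqk, ht]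
        simp [hut]
      · have hz := hpos q hq hqk
        rw [hgu] at hz
        simp [hz]
    simp [keepB, hcnt, hall]
  · intro hkeep q hq hqk
    simp only [keepB, Bool.and_eq_true, beq_iff_eq, List.all_eq_true] at hkeep
    obtain ⟨hcnt, hall⟩ := hkeep
    have hul : l.getD q [] ∈ l := (mem_iff_exists_getD l (l.getD q []) []).mpr ⟨q, hq, rfl⟩
    have hor := hall _ hul
    rcases (Bool.or_eq_true _ _).mp hor with h | h
    · have hut : l.getD q [] = t := by simpa using h
      have hq_in : q ∈ (List.range l.length).filter (fun r => l.getD r [] = t) :=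
        List.mem_filter.mpr ⟨List.mem_range.mpr hq, by simpa using hut⟩
      have hk_in : k ∈ (List.range l.length).filter (fun r => l.getD r [] = t) :=
        List.mem_filter.mpr ⟨List.mem_range.mpr hk, by simpa using ht⟩
      have h2 : 2 ≤ ((List.range l.length).filter (fun r => l.getD r [] = t)).length :=
        two_le_length_of_two_mem hqk hq_in hk_in
      rw [count_eq_length_filter_range l t []] at hcnt
      omega
    · simpa using h

lemma mem_pairReq (l : List (List Int)) (i j : Nat) (v : List Int) :
    v ∈ pairReq l i j ↔ i ≠ j ∧
      ((subB (l.getD j []) (l.getD i []) = true ∧ v = l.getD j []) ∨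
       (subB (l.getD i []) (l.getD j []) = true ∧ v = l.getD i [])) := by
  unfold pairReq
  by_cases hij : i = j
  · simp [hij]
  · by_cases h1 : subB (l.getD j []) (l.getD i []) = true <;>
      by_cases h2 : subB (l.getD i []) (l.getD j []) = true <;>
        simp [hij, h1, h2]

lemma mem_reqs_iff (l : List (List Int)) (v : List Int) :
    v ∈ reqs l ↔ ∃ p q, p < l.length ∧ q < l.length ∧ p ≠ q ∧ l.getD p [] = v ∧ subB v (l.getD q []) = true := by
  constructor
  · intro hv
    simp only [reqs, List.mem_flatMap, List.mem_range] at hv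
    obtain ⟨i, hi, j, hj, hpr⟩ := hv
    rcases (mem_pairReq l i j v).mp hpr with ⟨hij, hcase⟩
    rcases hcase with ⟨hs, rfl⟩ | ⟨hs, rfl⟩
    · exact ⟨j, i, hj, hi, Ne.symm hij, rfl, hs⟩
    · exact ⟨i, j, hi, hj, hij, rfl, hs⟩
  · rintro ⟨p, q, hp, hq, hpq, rfl, hs⟩
    simp only [reqs, List.mem_flatMap, List.mem_range]
    exact ⟨q, hq, p, hp, (mem_pairReq l q p _).mpr ⟨Ne.symm hpq, Or.inl ⟨hs, rfl⟩⟩⟩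

lemma not_mem_reqs_iff_keep (l : List (List Int)) (v : List Int) (hv : v ∈ l) :
    (v ∉ reqs l) ↔ keepB l v = true := by
  obtain ⟨k, hk, hgk⟩ := (mem_iff_exists_getD l v []).mp hv
  constructor
  · intro hnot
    apply (pos_iff_keep l k v hk hgk).mp
    intro q hq hqk
    cases hb : subB v (l.getD q []) with
    | false => rfl
    | true =>
      exact absurd ((mem_reqs_iff l v).mpr ⟨k, q, hk, hq, fun hh => hqk hh.symm, hgk, hb⟩) hnot
  · intro hkeep hmem
    obtain ⟨p, q, hp, hq, hpq, hgp, hsub⟩ := (mem_reqs_iff l v).mp hmem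
    have hz := (pos_iff_keep l p v hp hgp).mpr hkeep q hq (Ne.symm hpq)
    rw [hz] at hsub
    exact absurd hsub (by simp)

lemma portA_eq_filter (l : List (List Int)) : rem_sublist l = l.filter (keepB l) := by
  rw [rem_sublist_eq_natLoop, natLoop_eq_applyReqs,
    applyReqs_eq_filter l (reqs l) (fun v hvr hvl => count_reqs_ge l v hvr hvl)]
  apply List.filter_congr
  intro v hvl
  have h := not_mem_reqs_iff_keep l v hvl
  by_cases hm : v ∈ reqs l
  · have hkf : keepB l v = false := by
      cases hb : keepB l v with
      | false => rfl
      | true => exact absurd hm (h.mpr hb)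
    simp [hm, hkf]
  · have hkt : keepB l v = true := h.mp hm
    simp [hm, hkt]

-- ===== B-side helpers =====
def postingsD (l : List (List Int)) : PySem.Dict Int (PySem.Set Int) :=
  (PySem.List.enumerate l 0).foldl (fun d pt =>
    pt.2.foldl (fun d x => d.modify x PySem.Set.empty (fun s => PySem.Set.add s pt.1)) d)
    PySem.Dict.empty

def holdersD (l : List (List Int)) (pt : Int × List Int) : PySem.Set Int :=
  match PySem.Set.ofList pt.2 with
  | [] => PySem.Set.empty
  | x :: rest =>
    rest.foldl (fun acc y => PySem.Set.inter acc ((postingsD l).getD y PySem.Set.empty))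
      ((postingsD l).getD x PySem.Set.empty)

def condB (l : List (List Int)) (pt : Int × List Int) : Bool :=
  if pt.2 ≠ [] then PySem.Set.equal (holdersD l pt) (PySem.Set.ofList [pt.1])
  else decide (l.length = 1)

lemma portB_unfold (l : List (List Int)) :
    rem_sublist_alt l = (PySem.List.enumerate l 0).foldl
      (fun out pt => if condB l pt then out ++ [pt.2] else out) [] := by
  unfold rem_sublist_alt condB holdersD postingsD
  dsimp only
  congr 1
  funext out pt
  by_cases hnil : pt.2 = []
  · simp [hnil]
  · rw [if_pos hnil, if_pos hnil]

lemma set_add_idem (s : PySem.Set Int) (p : Int) :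
    PySem.Set.add (PySem.Set.add s p) p = PySem.Set.add s p := by
  by_cases hp : p ∈ s
  · simp [PySem.Set.add, hp]
  · simp [PySem.Set.add, hp]

lemma postStep (a : List Int) (d : PySem.Dict Int (PySem.Set Int)) (p : Int) (y : Int) :
    (a.foldl (fun d x => d.modify x PySem.Set.empty (fun s => PySem.Set.add s p)) d).getD y PySem.Set.empty
      = if y ∈ a then PySem.Set.add (d.getD y PySem.Set.empty) p
        else d.getD y PySem.Set.empty := by
  induction a generalizing d with
  | nil => simp
  | cons x a ih =>
    rw [List.foldl_cons, ih]
    rw [PySem.Dict.getD_modify]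
    by_cases hyx : y = x
    · by_cases hya : y ∈ a
      · simp [hyx, hya, set_add_idem]
      · simp [hyx, hya]
    · by_cases hya : y ∈ a <;> simp [hyx, hya, List.mem_cons]

lemma postingsD_append (l : List (List Int)) (a : List Int) :
    postingsD (l ++ [a]) = a.foldl
      (fun d x => d.modify x PySem.Set.empty (fun s => PySem.Set.add s (l.length : Int)))
      (postingsD l) := by
  unfold postingsD
  rw [PySem.List.enumerate_append, List.foldl_append]
  simp [PySem.List.enumerate_cons, PySem.List.enumerate_nil]

lemma postings_mem (l : List (List Int)) (y : Int) (q : Int) :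
    q ∈ (postingsD l).getD y PySem.Set.empty ↔
      ∃ k : Nat, k < l.length ∧ (k : Int) = q ∧ y ∈ l.getD k [] := by
  induction l using List.reverseRecOn with
  | nil => simp [postingsD, PySem.List.enumerate_nil, PySem.Dict.getD_empty, PySem.Set.empty]
  | append_singleton l a ih =>
    rw [postingsD_append, postStep]
    by_cases hy : y ∈ a
    · rw [if_pos hy]
      constructor
      · intro hq
        rcases (PySem.Set.mem_add _ _ _).mp hq with hold | hnew
        · obtain ⟨k, hk, hkq, hyk⟩ := ih.mp hold
          refine ⟨k, by simp; omega, hkq, ?_⟩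
          rw [List.getD_append _ _ _ _ hk]
          exact hyk
        · refine ⟨l.length, by simp, hnew.symm, ?_⟩
          rw [List.getD_append_right _ _ _ _ (le_refl _)]
          simpa using hy
      · rintro ⟨k, hk, hkq, hyk⟩
        by_cases hkl : k < l.length
        · exact (PySem.Set.mem_add _ _ _).mpr (Or.inl (ih.mpr ⟨k, hkl, hkq,
            by rwa [List.getD_append _ _ _ _ hkl] at hyk⟩))
        · have hke : k = l.length := by simp at hk; omega
          subst hke
          exact (PySem.Set.mem_add _ _ _).mpr (Or.inr hkq.symm)
    · rw [if_neg hy]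
      rw [ih]
      constructor
      · rintro ⟨k, hk, hkq, hyk⟩
        refine ⟨k, by simp; omega, hkq, ?_⟩
        rw [List.getD_append _ _ _ _ hk]
        exact hyk
      · rintro ⟨k, hk, hkq, hyk⟩
        by_cases hkl : k < l.length
        · exact ⟨k, hkl, hkq, by rwa [List.getD_append _ _ _ _ hkl] at hyk⟩
        · exfalso
          have hke : k = l.length := by simp at hk; omega
          subst hke
          rw [List.getD_append_right _ _ _ _ (le_refl _)] at hyk
          simp at hyk
          exact hy hyk

lemma postings_nodup (l : List (List Int)) (y : Int) :
    ((postingsD l).getD y PySem.Set.empty).Nodup := by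
  induction l using List.reverseRecOn with
  | nil => simp [postingsD, PySem.List.enumerate_nil, PySem.Dict.getD_empty, PySem.Set.empty]
  | append_singleton l a ih =>
    rw [postingsD_append, postStep]
    by_cases hy : y ∈ a
    · rw [if_pos hy]
      exact PySem.Set.nodup_add _ _ ih
    · rw [if_neg hy]
      exact ih

lemma foldl_inter_mem (P : Int → PySem.Set Int) (rest : List Int) (acc : PySem.Set Int) (q : Int) :
    q ∈ rest.foldl (fun a y => PySem.Set.inter a (P y)) acc ↔ q ∈ acc ∧ ∀ y ∈ rest, q ∈ P y := by
  induction rest generalizing acc with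
  | nil => simp
  | cons r rest ih =>
    rw [List.foldl_cons, ih]
    simp [PySem.Set.mem_inter]
    tauto

lemma foldl_inter_nodup (P : Int → PySem.Set Int) (rest : List Int) (acc : PySem.Set Int)
    (h : acc.Nodup) : (rest.foldl (fun a y => PySem.Set.inter a (P y)) acc).Nodup := by
  induction rest generalizing acc with
  | nil => exact h
  | cons r rest ih => exact ih _ (PySem.Set.nodup_inter _ _ h)

lemma keep_nil_iff (l : List (List Int)) (h : ([] : List Int) ∈ l) :
    keepB l [] = true ↔ l.length = 1 := by
  constructor
  · intro hb
    simp only [keepB, Bool.and_eq_true, beq_iff_eq, List.all_eq_true] at hb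
    obtain ⟨hcnt, hall⟩ := hb
    have hrep : ∀ u ∈ l, u = ([] : List Int) := by
      intro u hu
      have hor := hall u hu
      rcases (Bool.or_eq_true _ _).mp hor with h1 | h1
      · simpa using h1
      · have hs : subB [] u = true := by simp [subB]
        rw [hs] at h1
        simp at h1
    have hce : l.count ([] : List Int) = l.length :=
      List.count_eq_length.mpr (fun b hb => (hrep b hb).symm)
    omega
  · intro hone
    obtain ⟨x, hx⟩ := List.length_eq_one_iff.mp hone
    subst hx
    have hxe : x = ([] : List Int) := by simpa using h
    subst hxe
    rfl

lemma condB_eq_keep (l : List (List Int)) (k : Nat) (hk : k < l.length) :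
    condB l ((k : Int), l.getD k []) = keepB l (l.getD k []) := by
  set t := l.getD k [] with ht
  have htl : t ∈ l := (mem_iff_exists_getD l t []).mpr ⟨k, hk, rfl⟩
  by_cases hnil : t = []
  · have hmem : ([] : List Int) ∈ l := hnil ▸ htl
    have hiff := keep_nil_iff l hmem
    by_cases hone : l.length = 1
    · have hkt : keepB l ([] : List Int) = true := hiff.mpr hone
      simp [condB, hnil, hone, hkt]
    · have hkf : keepB l ([] : List Int) = false := by
        cases hb : keepB l [] with
        | false => rfl
        | true => exact absurd (hiff.mp hb) hone
      simp [condB, hnil, hone, hkf]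
  · -- nonempty tuple
    cases hofl : PySem.Set.ofList t with
    | nil =>
      exfalso
      obtain ⟨e, he⟩ := List.exists_mem_of_ne_nil t hnil
      have : e ∈ PySem.Set.ofList t := (PySem.Set.mem_ofList t e).mpr he
      rw [hofl] at this
      simp at this
    | cons x rest =>
      have hholders : ∀ q, q ∈ holdersD l ((k : Int), t) ↔
          ∀ y ∈ t, q ∈ (postingsD l).getD y PySem.Set.empty := by
        intro q
        show q ∈ (match PySem.Set.ofList t with
          | [] => PySem.Set.empty
          | x :: rest => rest.foldl (fun acc y => PySem.Set.inter acc ((postingsD l).getD y PySem.Set.empty))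
              ((postingsD l).getD x PySem.Set.empty)) ↔ _
        rw [hofl]
        rw [foldl_inter_mem]
        constructor
        · rintro ⟨hx, hrest⟩ y hy
          have : y ∈ PySem.Set.ofList t := (PySem.Set.mem_ofList t y).mpr hy
          rw [hofl] at this
          rcases List.mem_cons.mp this with h1 | h1
          · subst h1; exact hx
          · exact hrest y h1
        · intro hall
          constructor
          · apply hall
            apply (PySem.Set.mem_ofList t x).mp
            rw [hofl]
            exact List.mem_cons_self
          · intro y hy
            apply hall
            apply (PySem.Set.mem_ofList t y).mp
            rw [hofl]
            exact List.mem_cons_of_mem _ hy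
      have hmem_char : ∀ q, q ∈ holdersD l ((k : Int), t) ↔
          ∃ j : Nat, j < l.length ∧ (j : Int) = q ∧ subB t (l.getD j []) = true := by
        intro q
        rw [hholders q]
        constructor
        · intro hall
          have hx : x ∈ t := by
            apply (PySem.Set.mem_ofList t x).mp
            rw [hofl]
            exact List.mem_cons_self
          obtain ⟨j, hj, hjq, _⟩ := (postings_mem l x q).mp (hall x hx)
          refine ⟨j, hj, hjq, ?_⟩
          simp only [subB, List.all_eq_true]
          intro y hy
          obtain ⟨j2, hj2, hj2q, hyj2⟩ := (postings_mem l y q).mp (hall y hy)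
          have hje : j2 = j := by
            have : (j2 : Int) = (j : Int) := hj2q.trans hjq.symm
            exact_mod_cast this
          subst hje
          simpa using hyj2
        · rintro ⟨j, hj, hjq, hsub⟩ y hy
          apply (postings_mem l y q).mpr
          refine ⟨j, hj, hjq, ?_⟩
          simp only [subB, List.all_eq_true] at hsub
          have := hsub y hy
          simpa using this
      have hnodup : (holdersD l ((k : Int), t)).Nodup := by
        show (match PySem.Set.ofList t with
          | [] => PySem.Set.empty
          | x :: rest => rest.foldl (fun acc y => PySem.Set.inter acc ((postingsD l).getD y PySem.Set.empty))
              ((postingsD l).getD x PySem.Set.empty)).Nodup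
        rw [hofl]
        exact foldl_inter_nodup _ _ _ (postings_nodup l x)
      by_cases hkeep : keepB l t = true
      · have hpos := (pos_iff_keep l k t hk ht.symm).mpr hkeep
        have heq : PySem.Set.equal (holdersD l ((k : Int), t)) (PySem.Set.ofList [(k : Int)]) = true := by
          rw [PySem.Set.equal_iff]
          intro z
          rw [hmem_char z]
          constructor
          · rintro ⟨j, hj, hjq, hsub⟩
            have hje : j = k := by
              by_contra hne
              have hz := hpos j hj hne
              rw [hz] at hsub
              simp at hsub
            subst hje
            simp [PySem.Set.mem_ofList, ← hjq]
          · intro hz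
            have hzk : z = (k : Int) := by simpa [PySem.Set.mem_ofList] using hz
            refine ⟨k, hk, hzk.symm, ?_⟩
            rw [← ht]
            exact subB_self t
        simp [condB, hnil, heq, hkeep]
      · have hkf : keepB l t = false := by
          cases hb : keepB l t with
          | false => rfl
          | true => exact absurd hb hkeep
        have hnpos : ¬ (∀ q, q < l.length → q ≠ k → subB t (l.getD q []) = false) :=
          fun hp => hkeep ((pos_iff_keep l k t hk ht.symm).mp hp)
        push_neg at hnpos
        obtain ⟨q, hq, hqk, hsubne⟩ := hnpos
        have hsub' : subB t (l.getD q []) = true := by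
          cases hb : subB t (l.getD q []) with
          | false => exact absurd hb hsubne
          | true => rfl
        have heq : PySem.Set.equal (holdersD l ((k : Int), t)) (PySem.Set.ofList [(k : Int)]) = false := by
          cases hb : PySem.Set.equal (holdersD l ((k : Int), t)) (PySem.Set.ofList [(k : Int)]) with
          | false => rfl
          | true =>
            exfalso
            have hiff := (PySem.Set.equal_iff _ _).mp hb ((q : Nat) : Int)
            have hqin : ((q : Nat) : Int) ∈ holdersD l ((k : Int), t) :=
              (hmem_char _).mpr ⟨q, hq, rfl, hsub'⟩
            have hz := hiff.mp hqin
            have hzz : ((q : Nat) : Int) = (k : Int) := by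
              simpa [PySem.Set.mem_ofList] using hz
            exact hqk (by exact_mod_cast hzz)
        simp [condB, hnil, heq, hkf]

lemma map_snd_filter_comp (p : List Int → Bool) (xs : List (Int × List Int)) :
    (xs.filter (fun pt => p pt.2)).map (fun pt => pt.2) = (xs.map (fun pt => pt.2)).filter p := by
  induction xs with
  | nil => rfl
  | cons x xs ih => by_cases h : p x.2 <;> simp [List.filter_cons, h, ih]

lemma portB_eq_filter (l : List (List Int)) : rem_sublist_alt l = l.filter (keepB l) := by
  rw [portB_unfold]
  rw [PySem.List.foldl_append_if (condB l) (fun pt => pt.2)]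
  have hcg : (PySem.List.enumerate l 0).filter (condB l)
      = (PySem.List.enumerate l 0).filter (fun pt => keepB l pt.2) := by
    apply List.filter_congr
    intro pt hpt
    obtain ⟨k, hkl, rfl⟩ := (PySem.List.mem_enumerate_iff l 0 pt).mp hpt
    have h2 : l[k] = l.getD k [] := (List.getD_eq_getElem l [] hkl).symm
    show condB l (0 + (k : Int), l[k]) = keepB l l[k]
    rw [zero_add, h2]
    exact condB_eq_keep l k hkl
  rw [hcg, map_snd_filter_comp, PySem.List.map_snd_enumerate]
  simp

-- ===== VERDICT (by name: the statement is the Claim_ definition above) =====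
theorem rem_sublist_spec : Claim_equal_rem_sublist := by
  intro l _
  show rem_sublist l = rem_sublist_alt l
  rw [portA_eq_filter, portB_eq_filter]
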